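-- pv_equiv track=rewrite | github.com/dkenward/libgf2 | libgf2/gf2.py | _bitsOf
-- ===== SOURCE A (Python) =====
-- def _bitsOf(p,n=None):
--     def helper(p,n):
--         if n is None:
--             while p != 0:
--                 yield p & 1
--                 p >>= 1
--         else:
--             for _ in range(n):
--                 yield p & 1
--                 p >>= 1
--     return tuple(helper(p,n))
-- ===== SOURCE B (Python) =====
-- def _bitsOf(p, n=None):
--     if n is None:
--         n = p.bit_length()
--     if n <= 0:
--         return ()
--     def rec(q, m):
--         # LSB-first bits of q, where 0 <= q < 2**m and m >= 1,
--         # by splitting the bit range in two halves and recursing.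
--         if m == 1:
--             return (q,)
--         h = m // 2
--         return rec(q % (1 << h), h) + rec(q >> h, m - h)
--     return rec(p % (1 << n), n)
-- ===== Notes on version B (the rewrite author's own statement) =====
-- stated objective: alternative
-- what changed: Replaces A's sequential shift-and-yield generator by a divide-and-conquer scheme: reduce p to its low n bits with p % (1 << n) (n defaulting to p.bit_length()), then recursively split the bit range in two halves, emitting low-half bits then high-half bits.
-- outside the precondition, e.g. on _bitsOf(-3, None): A does not finish within the time limit, B returns (1, 0)
import Mathlib
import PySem

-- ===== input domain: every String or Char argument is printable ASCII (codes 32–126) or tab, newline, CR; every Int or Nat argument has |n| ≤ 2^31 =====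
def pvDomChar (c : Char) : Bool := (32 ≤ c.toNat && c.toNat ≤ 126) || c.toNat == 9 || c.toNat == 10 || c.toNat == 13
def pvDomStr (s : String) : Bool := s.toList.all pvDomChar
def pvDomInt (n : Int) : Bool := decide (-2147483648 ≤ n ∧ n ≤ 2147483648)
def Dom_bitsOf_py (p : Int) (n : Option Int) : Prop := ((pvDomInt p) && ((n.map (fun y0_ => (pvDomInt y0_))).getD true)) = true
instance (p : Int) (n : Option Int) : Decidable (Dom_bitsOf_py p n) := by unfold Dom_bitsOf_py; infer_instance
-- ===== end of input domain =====

-- B replaces A's sequential shift-and-yield generator by divide-and-conquer on the bit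
-- range: reduce to the low n bits with p % (1 << n), then recursively split the range in halves.


-- ===== PORT A =====
-- helper branch 'n is None': 'while p != 0: yield p & 1; p >>= 1'.
-- For p < 0 the Python loop never terminates (such inputs are outside Pre_);
-- the guard 0 < p only totalizes the recursion, it is p != 0 on every admitted input.
def bitsA_whileLoop (p : Int) : List Int :=
  if _h : 0 < p then PySem.Int.band p 1 :: bitsA_whileLoop (p >>> (1 : Nat)) else []
termination_by p.toNat
decreasing_by rw [Int.shiftRight_eq_div_pow]; omega

-- helper branch 'n given': 'for _ in range(n): yield p & 1; p >>= 1'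
def bitsA_forLoop (p : Int) : Nat → List Int
  | 0 => []
  | k + 1 => PySem.Int.band p 1 :: bitsA_forLoop (p >>> (1 : Nat)) k

def bitsOf_py (p : Int) (n : Option Int) : List Int :=
  match n with
  | none => bitsA_whileLoop p
  | some k => bitsA_forLoop p k.toNat    -- range(k) runs max(k,0) times

-- ===== PORT B =====
-- 'def rec(q, m)': LSB-first bits of q (0 ≤ q < 2^m, m ≥ 1) by halving the bit range.
-- The m = 0 case is unreachable in Source B (rec is only called with m ≥ 1); it totalizes the recursion.
def bitsB_rec (q : Int) (m : Nat) : List Int :=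
  if m = 0 then []
  else if m = 1 then [q]
  else
    let h := m / 2
    bitsB_rec (PySem.Int.mod q (2 ^ h)) h ++ bitsB_rec (q >>> h) (m - h)
termination_by m
decreasing_by
  · omega
  · omega

def bitsOf_py_alt (p : Int) (n : Option Int) : List Int :=
  let nn : Int := match n with
    | none => (PySem.Int.bitLength p : Int)   -- n = p.bit_length()
    | some k => k
  if nn ≤ 0 then []
  else bitsB_rec (PySem.Int.mod p (2 ^ nn.toNat)) nn.toNat   -- rec(p % (1 << n), n)

-- ===== PRECONDITION & SPEC =====
-- Pre_ excludes only n = None with p < 0, where Python A loops forever (no return).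
def Pre_bitsOf_py (p : Int) (n : Option Int) : Prop := n = none → 0 ≤ p
instance (p : Int) (n : Option Int) : Decidable (Pre_bitsOf_py p n) := by
  unfold Pre_bitsOf_py; infer_instance
def pvWitness_bitsOf_py : Int × Option Int := (6, none)

def Spec_bitsOf_py (p : Int) (n : Option Int) (out : List Int) : Prop := out = bitsOf_py_alt p n
instance (p : Int) (n : Option Int) (out : List Int) : Decidable (Spec_bitsOf_py p n out) := by
  unfold Spec_bitsOf_py; infer_instance

-- ===== CLAIM (what is proved, stated in full; the proofs are below) =====
def Claim_equal_bitsOf_py : Prop := ∀ (p : Int) (n : Option Int),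
  Dom_bitsOf_py p n → Pre_bitsOf_py p n → Spec_bitsOf_py p n (bitsOf_py p n)

-- ===== LEMMAS AND PROOFS =====

lemma shiftRight_shiftRight (p : Int) (a b : Nat) :
    (p >>> a) >>> b = p >>> (a + b) := by
  rw [Int.shiftRight_eq_div_pow, Int.shiftRight_eq_div_pow, Int.shiftRight_eq_div_pow,
      Int.ediv_ediv_of_nonneg (by positivity)]
  push_cast [pow_add]
  ring_nf

-- taking i-th bit (i < h) commutes with reduction mod 2^h
lemma lowbit_emod (p : Int) (i h : Nat) (hih : i < h) :
    ((p % 2 ^ h) >>> i) % 2 = (p >>> i) % 2 := by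
  rw [Int.shiftRight_eq_div_pow, Int.shiftRight_eq_div_pow]
  push_cast
  have h1 : p = p % 2 ^ h + 2 ^ (h - i - 1) * (p / 2 ^ h) * 2 * 2 ^ i := by
    have e : (2 : Int) ^ (h - i - 1) * 2 * 2 ^ i = 2 ^ h := by
      rw [mul_assoc, ← pow_succ', ← pow_add]
      congr 1
      omega
    have := Int.emod_add_mul_ediv p (2 ^ h)
    calc p = p % 2 ^ h + 2 ^ h * (p / 2 ^ h) := by omega
      _ = p % 2 ^ h + 2 ^ (h - i - 1) * (p / 2 ^ h) * 2 * 2 ^ i := by rw [← e]; ring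
  conv_rhs => rw [h1]
  rw [Int.add_mul_ediv_right _ _ (by positivity : (0:Int) < 2 ^ i).ne']
  omega

-- B's recursive splitter produces the indexed low bits.
lemma bitsB_rec_eq (m : Nat) : ∀ q : Int, 0 ≤ q → q < 2 ^ m →
    bitsB_rec q m = (List.range m).map (fun i : Nat => (q >>> i) % 2) := by
  induction m using Nat.strong_induction_on with
  | _ m ih =>
    intro q h0 hlt
    match m, hlt with
    | 0, hlt =>
      rw [bitsB_rec]
      simp
    | 1, hlt =>
      rw [bitsB_rec]
      norm_num
      omega
    | (k + 2), hlt =>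
      have hm2 : (k + 2) ≠ 0 := by omega
      have hm1 : (k + 2) ≠ 1 := by omega
      have hstep : bitsB_rec q (k + 2)
          = bitsB_rec (PySem.Int.mod q (2 ^ ((k + 2) / 2))) ((k + 2) / 2)
            ++ bitsB_rec (q >>> ((k + 2) / 2)) ((k + 2) - (k + 2) / 2) := by
        rw [bitsB_rec]
        simp [hm1]
      rw [hstep]
      set m := k + 2 with hm
      set h := m / 2 with hh
      have hh1 : 1 ≤ h := by omega
      have hhm : h < m := by omega
      have e1 : bitsB_rec (PySem.Int.mod q (2 ^ h)) h
          = (List.range h).map (fun i : Nat => ((q % 2 ^ h) >>> i) % 2) := by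
        rw [PySem.Int.mod_eq_emod_of_pos (by positivity)]
        exact ih h hhm _ (Int.emod_nonneg _ (by positivity)) (Int.emod_lt_of_pos _ (by positivity))
      have e2 : bitsB_rec (q >>> h) (m - h)
          = (List.range (m - h)).map (fun j : Nat => ((q >>> h) >>> j) % 2) := by
        apply ih (m - h) (by omega)
        · rw [Int.shiftRight_eq_div_pow]; positivity
        · rw [Int.shiftRight_eq_div_pow]
          push_cast
          apply Int.ediv_lt_of_lt_mul (by positivity)
          have epow : (2 : Int) ^ (m - h) * 2 ^ h = 2 ^ m := by
            rw [← pow_add]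
            congr 1
            omega
          linarith
      rw [e1, e2]
      have hrange : List.range m = List.range h ++ (List.range (m - h)).map (h + ·) := by
        have : m = h + (m - h) := by omega
        rw [this, List.range_add]
        simp
      rw [hrange, List.map_append, List.map_map]
      congr 1
      · exact List.map_congr_left (fun i hi => lowbit_emod q i h (List.mem_range.mp hi))
      · apply List.map_congr_left
        intro j _
        simp only [Function.comp]
        rw [shiftRight_shiftRight]

-- A's n-given loop produces the same indexed bits (via band x 1 = x % 2).
lemma bitsA_forLoop_eq (k : Nat) : ∀ p : Int,
    bitsA_forLoop p k = (List.range k).map (fun i : Nat => (p >>> i) % 2) := by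
  induction k with
  | zero => intro p; rfl
  | succ k ih =>
    intro p
    rw [List.range_succ_eq_map]
    simp only [bitsA_forLoop, List.map_cons, List.map_map, ih (p >>> (1 : Nat))]
    congr 1
    · rw [PySem.Int.band_one, PySem.Int.mod_eq_emod_of_pos (by norm_num)]
      rw [Int.shiftRight_eq_div_pow]; norm_num
    · apply List.map_congr_left
      intro i _
      simp only [Function.comp]
      rw [shiftRight_shiftRight, Nat.add_comm]

-- A's while loop runs exactly bit_length(p) times on 0 ≤ p.
lemma bitsA_whileLoop_eq (m : Nat) : ∀ p : Int, 0 ≤ p → p.toNat ≤ m →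
    bitsA_whileLoop p = bitsA_forLoop p (PySem.Int.bitLength p) := by
  induction m with
  | zero =>
    intro p h0 hm
    have hp : p = 0 := by omega
    subst hp
    rw [bitsA_whileLoop]
    norm_num [PySem.Int.bitLength_zero, bitsA_forLoop]
  | succ m ih =>
    intro p h0 hm
    by_cases hp : 0 < p
    · have hbl : PySem.Int.bitLength p = PySem.Int.bitLength (p >>> (1 : Nat)) + 1 := by
        rw [Int.shiftRight_eq_div_pow]
        rw [PySem.Int.bitLength_of_pos hp, PySem.Int.floordiv_eq_ediv_of_pos (by norm_num)]
        norm_num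
      rw [bitsA_whileLoop, dif_pos hp, hbl, bitsA_forLoop]
      have hle : (p >>> (1 : Nat)).toNat ≤ m := by
        rw [Int.shiftRight_eq_div_pow]; omega
      have hnn : 0 ≤ p >>> (1 : Nat) := by
        rw [Int.shiftRight_eq_div_pow]; omega
      rw [ih _ hnn hle]
    · have hp0 : p = 0 := by omega
      subst hp0
      rw [bitsA_whileLoop]
      norm_num [PySem.Int.bitLength_zero, bitsA_forLoop]

-- the common reduction: A's indexed bits of p over range m equal B's splitter on p % 2^m
lemma forLoop_eq_rec (p : Int) (m : Nat) :
    bitsA_forLoop p m = bitsB_rec (PySem.Int.mod p (2 ^ m)) m := by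
  rw [PySem.Int.mod_eq_emod_of_pos (by positivity)]
  rw [bitsB_rec_eq m _ (Int.emod_nonneg _ (by positivity)) (Int.emod_lt_of_pos _ (by positivity))]
  rw [bitsA_forLoop_eq]
  exact List.map_congr_left (fun i hi => (lowbit_emod p i m (List.mem_range.mp hi)).symm)

-- ===== VERDICT (by name: the statement is the Claim_ definition above) =====
theorem bitsOf_py_spec : Claim_equal_bitsOf_py := by
  intro p n _ hpre
  unfold Spec_bitsOf_py bitsOf_py bitsOf_py_alt
  match n with
  | some k =>
    simp only
    by_cases hk : k ≤ 0
    · rw [if_pos hk]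
      have : k.toNat = 0 := by omega
      rw [this]
      rfl
    · rw [if_neg hk]
      exact forLoop_eq_rec p k.toNat
  | none =>
    have h0 : 0 ≤ p := hpre rfl
    simp only
    rw [bitsA_whileLoop_eq p.toNat p h0 le_rfl]
    by_cases hz : p = 0
    · subst hz
      norm_num [PySem.Int.bitLength_zero, bitsA_forLoop]
    · have hpos : 0 < p := by omega
      have hbl0 : PySem.Int.bitLength p ≠ 0 := by
        rw [PySem.Int.bitLength_of_pos hpos]; omega
      rw [if_neg (by simpa using hbl0)]
      have htn : ((PySem.Int.bitLength p : Int)).toNat = PySem.Int.bitLength p := by simp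
      rw [htn, forLoop_eq_rec]
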